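-- pv_equiv track=rewrite | github.com/yam89421/MLH-EPILEPSY-EEG | seizure_prediction_thalgo.py | _preictal_blocks
-- ===== SOURCE A (Python) =====
-- def _preictal_blocks(labels_raw):
--     blocks, in_block = [], False
--     for i, lbl in enumerate(labels_raw):
--         if lbl == 2 and not in_block:
--             start, in_block = i, True
--         elif lbl != 2 and in_block:
--             blocks.append((start, i)); in_block = False
--     if in_block:
--         blocks.append((start, len(labels_raw)))
--     return blocks
-- ===== SOURCE B (Python) =====
-- def _preictal_blocks(labels_raw):
--     blocks, i, n = [], 0, len(labels_raw)
--     while i < n: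
--         j = i + 1
--         while j < n and labels_raw[j] == labels_raw[i]:
--             j += 1
--         if labels_raw[i] == 2:
--             blocks.append((i, j))
--         i = j
--     return blocks
-- ===== Notes on version B (the rewrite author's own statement) =====
-- stated objective: alternative
-- what changed: Replaces the in_block boolean state machine (with its trailing-block special case) by iteration over maximal runs of equal labels: scan each run to its end, emit (start, end) when the run's label is 2.
import Mathlib
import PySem

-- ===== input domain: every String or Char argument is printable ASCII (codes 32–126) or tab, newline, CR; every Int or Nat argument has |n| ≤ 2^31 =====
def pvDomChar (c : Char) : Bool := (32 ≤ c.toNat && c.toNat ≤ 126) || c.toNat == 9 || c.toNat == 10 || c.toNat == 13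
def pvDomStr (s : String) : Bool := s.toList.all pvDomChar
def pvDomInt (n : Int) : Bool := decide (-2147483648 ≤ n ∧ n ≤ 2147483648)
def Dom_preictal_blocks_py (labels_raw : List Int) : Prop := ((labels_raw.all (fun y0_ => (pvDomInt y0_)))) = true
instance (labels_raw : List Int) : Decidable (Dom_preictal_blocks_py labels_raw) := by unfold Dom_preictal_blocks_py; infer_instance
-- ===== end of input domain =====

-- B replaces A's in_block boolean state machine (and its trailing-block special case) by
-- iteration over maximal runs of equal labels; same O(n) cost (objective: alternative).

-- ===== PORT A =====
-- A's loop over enumerate(labels_raw) with state (blocks, in_block, start); i is the enumerate index.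
def pvAGo (blocks : List (Int × Int)) (in_block : Bool) (start : Int) (i : Int) :
    List Int → List (Int × Int) × Bool × Int
  | [] => (blocks, in_block, start)
  | lbl :: rest =>
    if lbl = 2 ∧ in_block = false then pvAGo blocks true i (i + 1) rest
    else if lbl ≠ 2 ∧ in_block = true then pvAGo (blocks ++ [(start, i)]) false start (i + 1) rest
    else pvAGo blocks in_block start (i + 1) rest

def preictal_blocks_py (labels_raw : List Int) : List (Int × Int) :=
  let r := pvAGo [] false 0 0 labels_raw
  if r.2.1 then r.1 ++ [(r.2.2, (labels_raw.length : Int))] else r.1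

-- ===== PORT B =====
-- length of the run of elements equal to v at the head of the list (B's inner while loop)
def pvRunLen (v : Int) : List Int → Nat
  | [] => 0
  | x :: xs => if x = v then pvRunLen v xs + 1 else 0

-- B's outer while loop: jump run by run; i is the absolute index of the run's start.
def pvAltGo (i : Int) : List Int → List (Int × Int)
  | [] => []
  | x :: xs =>
    if x = 2 then
      (i, i + 1 + (pvRunLen x xs : Int)) :: pvAltGo (i + 1 + (pvRunLen x xs : Int)) (xs.drop (pvRunLen x xs))
    else pvAltGo (i + 1 + (pvRunLen x xs : Int)) (xs.drop (pvRunLen x xs))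
termination_by xs => xs.length
decreasing_by all_goals (simp only [List.length_drop, List.length_cons]; omega)

def preictal_blocks_py_alt (labels_raw : List Int) : List (Int × Int) :=
  pvAltGo 0 labels_raw

-- ===== PRECONDITION & SPEC =====
def Spec_preictal_blocks_py (labels_raw : List Int) (out : List (Int × Int)) : Prop := out = preictal_blocks_py_alt labels_raw
instance (labels_raw : List Int) (out : List (Int × Int)) : Decidable (Spec_preictal_blocks_py labels_raw out) := by unfold Spec_preictal_blocks_py; infer_instance

-- ===== CLAIM (what is proved, stated in full; the proofs are below) =====
def Claim_equal_preictal_blocks_py : Prop := ∀ (labels_raw : List Int), Dom_preictal_blocks_py labels_raw → Spec_preictal_blocks_py labels_raw (preictal_blocks_py labels_raw)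

-- ===== LEMMAS AND PROOFS =====

-- reference state machine: the open block (if any) carried as an Option, emitting directly
def pvE : Option Int → Int → List Int → List (Int × Int)
  | none, _, [] => []
  | some s, i, [] => [(s, i)]
  | none, i, x :: r => if x = 2 then pvE (some i) (i + 1) r else pvE none (i + 1) r
  | some s, i, x :: r => if x = 2 then pvE (some s) (i + 1) r else (s, i) :: pvE none (i + 1) r

theorem pvAltGo_nil (i : Int) : pvAltGo i [] = [] := by
  rw [pvAltGo.eq_def]

theorem pvAltGo_cons (i x : Int) (xs : List Int) :
    pvAltGo i (x :: xs) =
      if x = 2 then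
        (i, i + 1 + (pvRunLen x xs : Int)) ::
          pvAltGo (i + 1 + (pvRunLen x xs : Int)) (xs.drop (pvRunLen x xs))
      else pvAltGo (i + 1 + (pvRunLen x xs : Int)) (xs.drop (pvRunLen x xs)) := by
  rw [pvAltGo.eq_def]

theorem pvE_none_cons (i x : Int) (r : List Int) :
    pvE none i (x :: r) = if x = 2 then pvE (some i) (i + 1) r else pvE none (i + 1) r := rfl

theorem pvE_some_cons (s i x : Int) (r : List Int) :
    pvE (some s) i (x :: r) =
      if x = 2 then pvE (some s) (i + 1) r else (s, i) :: pvE none (i + 1) r := rfl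

theorem pvAGo_eq_pvE : ∀ (xs : List Int) (blocks : List (Int × Int)) (b : Bool) (s i : Int),
    (if (pvAGo blocks b s i xs).2.1 then
        (pvAGo blocks b s i xs).1 ++ [((pvAGo blocks b s i xs).2.2, i + (xs.length : Int))]
      else (pvAGo blocks b s i xs).1)
      = blocks ++ pvE (if b then some s else none) i xs := by
  intro xs
  induction xs with
  | nil =>
    intro blocks b s i
    cases b <;> simp [pvAGo, pvE]
  | cons x r ih =>
    intro blocks b s i
    have hlen : (i + ((x :: r).length : Int)) = (i + 1) + (r.length : Int) := by
      simp only [List.length_cons]; push_cast; ring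
    rw [hlen]
    by_cases hx : x = 2 <;> cases b
    · -- x = 2, in_block = false : open a block
      simpa [pvAGo, pvE_none_cons, hx] using ih blocks true i (i + 1)
    · -- x = 2, in_block = true : keep going
      simpa [pvAGo, pvE_some_cons, hx] using ih blocks true s (i + 1)
    · -- x ≠ 2, in_block = false : keep going
      simpa [pvAGo, pvE_none_cons, hx] using ih blocks false s (i + 1)
    · -- x ≠ 2, in_block = true : close the block
      simpa [pvAGo, pvE_some_cons, hx] using ih (blocks ++ [(s, i)]) false s (i + 1)

theorem pvAltGo_skip (i : Int) (x : Int) (r : List Int) (hx : x ≠ 2) :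
    pvAltGo i (x :: r) = pvAltGo (i + 1) r := by
  cases r with
  | nil => simp [pvAltGo_cons, pvAltGo_nil, pvRunLen, hx]
  | cons y r2 =>
    by_cases hy : y = x
    · subst hy
      rw [pvAltGo_cons, pvAltGo_cons]
      simp only [pvRunLen, hx, reduceIte, List.drop_succ_cons]
      congr 1
      push_cast; ring
    · rw [pvAltGo_cons]
      simp [pvRunLen, hx, hy]

theorem pvE_eq_pvAltGo_aux : ∀ (n : Nat) (xs : List Int), xs.length ≤ n →
    (∀ i : Int, pvE none i xs = pvAltGo i xs) ∧
    (∀ s i : Int, pvE (some s) i xs =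
      (s, i + (pvRunLen 2 xs : Int)) ::
        pvAltGo (i + (pvRunLen 2 xs : Int)) (xs.drop (pvRunLen 2 xs))) := by
  intro n
  induction n with
  | zero =>
    intro xs h
    have hnil : xs = [] := List.eq_nil_of_length_eq_zero (Nat.le_zero.mp h)
    subst hnil
    exact ⟨fun i => by simp [pvE, pvAltGo_nil],
           fun s i => by simp [pvE, pvAltGo_nil, pvRunLen]⟩
  | succ n ih =>
    intro xs h
    cases xs with
    | nil =>
      exact ⟨fun i => by simp [pvE, pvAltGo_nil],
             fun s i => by simp [pvE, pvAltGo_nil, pvRunLen]⟩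
    | cons x r =>
      have hr : r.length ≤ n := by simp at h; omega
      constructor
      · intro i
        by_cases hx : x = 2
        · subst hx
          rw [pvE, if_pos rfl, (ih r hr).2 i (i + 1), pvAltGo_cons, if_pos rfl]
        · rw [pvE, if_neg hx, (ih r hr).1 (i + 1)]
          exact (pvAltGo_skip i x r hx).symm
      · intro s i
        by_cases hx : x = 2
        · subst hx
          rw [pvE, if_pos rfl, (ih r hr).2 s (i + 1)]
          have hk : pvRunLen 2 (2 :: r) = pvRunLen 2 r + 1 := by simp [pvRunLen]
          rw [hk]
          simp only [List.drop_succ_cons]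
          congr 2 <;> push_cast <;> ring
        · rw [pvE, if_neg hx, (ih r hr).1 (i + 1), ← pvAltGo_skip i x r hx]
          have hk : pvRunLen 2 (x :: r) = 0 := by simp [pvRunLen, hx]
          simp [hk]

-- ===== VERDICT (by name: the statement is the Claim_ definition above) =====
theorem preictal_blocks_py_spec : Claim_equal_preictal_blocks_py := by
  intro labels_raw _
  unfold Spec_preictal_blocks_py preictal_blocks_py preictal_blocks_py_alt
  have h := pvAGo_eq_pvE labels_raw [] false 0 0
  simp only [Bool.false_eq_true, reduceIte, List.nil_append, zero_add] at h
  simp only []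
  rw [h, (pvE_eq_pvAltGo_aux labels_raw.length labels_raw le_rfl).1 0]
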